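-- pv_equiv track=rewrite | github.com/Devul5788/Coursework | ECE 448 MPs/MP 1/template/naive_bayes.py | create_word_maps_bi
-- ===== SOURCE A (Python) =====
-- from collections import Counter
--
-- def count_words(X, y, flag):
--     word_count_map = {}
--     for idx in range(len(y)):
--         if(y[idx] == flag):
--             elements_count = Counter(X[idx])
--             # value is word, key is count
--             for value, key in elements_count.items():
--                 if word_count_map.__contains__(value):
--                     word_count_map[value] = word_count_map[value] + key
--                 else:
--                     word_count_map[value] = key
--
--     return word_count_map
--
-- def create_word_maps_bi(X, y, max_size=None):
--     """
--     X: train sets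
--     y: train labels
--     max_size: you can ignore this, we are not using it
--
--     return two dictionaries: pos_vocab, neg_vocab
--     pos_vocab:
--         In data where labels are 1
--         keys: pairs of words
--         values: number of times the word pair appears
--     neg_vocab:
--         In data where labels are 0
--         keys: words
--         values: number of times the word pair appears
--     """
--
--     pos_vocab = count_words(X, y, 1)
--     neg_vocab = count_words(X, y, 0)
--
--     newX = []
--
--     for i in range(len(X)):
--         newX.append([])
--         for j in range(len(X[i]) - 1):
--             newX[i].append(X[i][j] + ' ' + X[i][j + 1])
--
--     pos_bigram = count_words(newX, y, 1)
--     neg_bigram = count_words(newX, y, 0)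
--
--     pos_vocab.update(pos_bigram)
--     neg_vocab.update(neg_bigram)
--
--     return dict(pos_vocab), dict(neg_vocab)
-- ===== SOURCE B (Python) =====
-- from collections import Counter
--
-- def create_word_maps_bi(X, y, max_size=None):
--     accs = {1: ({}, {}), 0: ({}, {})}
--     for idx in range(len(y)):
--         label = y[idx]
--         if label not in accs:
--             continue
--         uni, bi = accs[label]
--         doc = X[idx]
--         for w, c in Counter(doc).items():
--             uni[w] = uni.get(w, 0) + c
--         pairs = [doc[j] + ' ' + doc[j + 1] for j in range(len(doc) - 1)]
--         for w, c in Counter(pairs).items():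
--             bi[w] = bi.get(w, 0) + c
--     pos_uni, pos_bi = accs[1]
--     neg_uni, neg_bi = accs[0]
--     pos_uni.update(pos_bi)
--     neg_uni.update(neg_bi)
--     return dict(pos_uni), dict(neg_uni)
-- ===== Notes on version B (the rewrite author's own statement) =====
-- stated objective: faster
-- what changed: Replaces the four filtered count_words passes plus a materialized newX bigram corpus with a single pass over range(len(y)) that accumulates per-label unigram and bigram dicts separately and merges them with one update per label at the end.
import Mathlib
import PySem

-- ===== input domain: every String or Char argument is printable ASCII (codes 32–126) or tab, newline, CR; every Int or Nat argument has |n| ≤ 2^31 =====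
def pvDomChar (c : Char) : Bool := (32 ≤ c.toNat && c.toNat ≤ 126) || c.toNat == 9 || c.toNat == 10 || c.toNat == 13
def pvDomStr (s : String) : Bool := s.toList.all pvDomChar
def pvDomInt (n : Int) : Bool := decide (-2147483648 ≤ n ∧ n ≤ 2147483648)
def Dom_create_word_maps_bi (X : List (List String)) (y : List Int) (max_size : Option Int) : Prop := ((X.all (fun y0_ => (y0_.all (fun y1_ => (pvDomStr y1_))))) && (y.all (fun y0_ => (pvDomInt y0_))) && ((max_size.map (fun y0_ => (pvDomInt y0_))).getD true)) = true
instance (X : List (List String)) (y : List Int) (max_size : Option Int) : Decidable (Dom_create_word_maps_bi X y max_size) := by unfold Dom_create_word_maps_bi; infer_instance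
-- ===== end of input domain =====

-- B re-implements A in ONE pass over the corpus with four separate accumulators (no four
-- filtered count_words passes, no materialized newX list); same return value, same order.

-- ===== PORT A =====
-- A-side helper: count_words(X, y, flag)
def pvCountWords (X : List (List String)) (y : List Int) (flag : Int) : PySem.Dict String Int :=
  (PySem.List.pyRange 0 (PySem.List.len y) 1).foldl (fun m idx =>
    if PySem.List.pyGetD y idx 0 == flag then
      -- elements_count = Counter(X[idx]); then the item loop with the __contains__ branch
      (PySem.Dict.counter (PySem.List.pyGetD X idx [])).items.foldl (fun m p =>
        if m.contains p.1 then m.insert p.1 (m.getD p.1 0 + p.2) else m.insert p.1 p.2) m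
    else m) PySem.Dict.empty

def create_word_maps_bi (X : List (List String)) (y : List Int) (max_size : Option Int) : (List (String × Int)) × (List (String × Int)) :=
  let pos_vocab := pvCountWords X y 1
  let neg_vocab := pvCountWords X y 0
  -- newX: for i in range(len(X)): newX.append([]); for j: newX[i].append(X[i][j] + ' ' + X[i][j+1])
  let newX := (PySem.List.pyRange 0 (PySem.List.len X) 1).foldl (fun newX i =>
    newX ++ [(PySem.List.pyRange 0 (PySem.List.len (PySem.List.pyGetD X i []) - 1) 1).foldl
      (fun row j => row ++ [PySem.List.pyGetD (PySem.List.pyGetD X i []) j "" ++ " " ++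
                            PySem.List.pyGetD (PySem.List.pyGetD X i []) (j + 1) ""]) []]) []
  let pos_bigram := pvCountWords newX y 1
  let neg_bigram := pvCountWords newX y 0
  ((pos_vocab.update pos_bigram.items).items, (neg_vocab.update neg_bigram.items).items)

-- ===== PORT B =====
-- B-side helper: add Counter(ws).items() into the accumulator acc
def pvAdd (acc : PySem.Dict String Int) (ws : List String) : PySem.Dict String Int :=
  (PySem.Dict.counter ws).items.foldl (fun acc p => acc.insert p.1 (acc.getD p.1 0 + p.2)) acc

-- B-side helper: pairs = [doc[j] + ' ' + doc[j+1] for j in range(len(doc) - 1)]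
def pvBigrams (doc : List String) : List String :=
  (PySem.List.pyRange 0 (PySem.List.len doc - 1) 1).map
    (fun j => PySem.List.pyGetD doc j "" ++ " " ++ PySem.List.pyGetD doc (j + 1) "")

def create_word_maps_bi_alt (X : List (List String)) (y : List Int) (max_size : Option Int) : (List (String × Int)) × (List (String × Int)) :=
  -- accs = {1: ({}, {}), 0: ({}, {})} as the 4-tuple (pos_uni, pos_bi, neg_uni, neg_bi)
  let s := (PySem.List.pyRange 0 (PySem.List.len y) 1).foldl (fun s idx =>
    let label := PySem.List.pyGetD y idx 0
    if label == 1 then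
      let doc := PySem.List.pyGetD X idx []
      (pvAdd s.1 doc, pvAdd s.2.1 (pvBigrams doc), s.2.2.1, s.2.2.2)
    else if label == 0 then
      let doc := PySem.List.pyGetD X idx []
      (s.1, s.2.1, pvAdd s.2.2.1 doc, pvAdd s.2.2.2 (pvBigrams doc))
    else s)
    (PySem.Dict.empty, PySem.Dict.empty, PySem.Dict.empty, PySem.Dict.empty)
  ((s.1.update s.2.1.items).items, (s.2.2.1.update s.2.2.2.items).items)

-- ===== PRECONDITION & SPEC =====
-- Pre_ excludes exactly the inputs where some index beyond len(X) carries a label 0 or 1: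
-- there A raises IndexError (X[idx] inside count_words), and B raises the same IndexError
-- on its single pass; labels other than 0/1 never index X in either program.
def Pre_create_word_maps_bi (X : List (List String)) (y : List Int) (max_size : Option Int) : Prop :=
  ∀ v ∈ y.drop X.length, ¬(v = 0 ∨ v = 1)
instance (X : List (List String)) (y : List Int) (max_size : Option Int) : Decidable (Pre_create_word_maps_bi X y max_size) := by unfold Pre_create_word_maps_bi; infer_instance

def pvWitness_create_word_maps_bi : List (List String) × List Int × Option Int :=
  ([["a", "b", "a"], ["c", "a"]], [1, 0], none)

def Spec_create_word_maps_bi (X : List (List String)) (y : List Int) (max_size : Option Int) (out : (List (String × Int)) × (List (String × Int))) : Prop := out = create_word_maps_bi_alt X y max_size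
instance (X : List (List String)) (y : List Int) (max_size : Option Int) (out : (List (String × Int)) × (List (String × Int))) : Decidable (Spec_create_word_maps_bi X y max_size out) := by unfold Spec_create_word_maps_bi; infer_instance

-- ===== CLAIM (what is proved, stated in full; the proofs are below) =====
def Claim_equal_create_word_maps_bi : Prop := ∀ (X : List (List String)) (y : List Int) (max_size : Option Int), Dom_create_word_maps_bi X y max_size → Pre_create_word_maps_bi X y max_size → Spec_create_word_maps_bi X y max_size (create_word_maps_bi X y max_size)

-- ===== LEMMAS AND PROOFS =====

-- A's __contains__-branched item loop adds exactly like B's get(w, 0) + c loop.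
lemma pvAddA_eq_pvAdd (m : PySem.Dict String Int) (ws : List String) :
    (PySem.Dict.counter ws).items.foldl (fun m p =>
      if m.contains p.1 then m.insert p.1 (m.getD p.1 0 + p.2) else m.insert p.1 p.2) m
    = pvAdd m ws := by
  unfold pvAdd
  generalize (PySem.Dict.counter ws).items = l
  induction l generalizing m with
  | nil => rfl
  | cons p l ih =>
    simp only [List.foldl_cons]
    rw [← ih]
    congr 1
    by_cases h : m.contains p.1
    · simp [h]
    · have hg : m.getD p.1 0 = 0 := PySem.Dict.getD_of_not_contains _ _ (by simpa using h)
      simp [h, hg]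

-- a projection through a component-wise fold
lemma foldl_proj {σ τ ι : Type} (G : τ → ι → τ) (g : σ → ι → σ) (p : τ → σ)
    (h : ∀ s i, p (G s i) = g (p s) i) :
    ∀ (L : List ι) (s : τ), p (L.foldl G s) = L.foldl g (p s) := by
  intro L
  induction L with
  | nil => intro s; rfl
  | cons i L ih => intro s; simp only [List.foldl_cons, ih, h]

-- the inner row loop of newX is pvBigrams
lemma pvRow_eq_bigrams (doc : List String) :
    (PySem.List.pyRange 0 (PySem.List.len doc - 1) 1).foldl
      (fun row j => row ++ [PySem.List.pyGetD doc j "" ++ " " ++ PySem.List.pyGetD doc (j + 1) ""]) []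
    = pvBigrams doc := by
  unfold pvBigrams
  simpa using PySem.List.foldl_append_singleton_eq_map _ _ []

-- newX = X.map pvBigrams
lemma newX_eq_map (X : List (List String)) :
    (PySem.List.pyRange 0 (PySem.List.len X) 1).foldl (fun newX i =>
      newX ++ [(PySem.List.pyRange 0 (PySem.List.len (PySem.List.pyGetD X i []) - 1) 1).foldl
        (fun row j => row ++ [PySem.List.pyGetD (PySem.List.pyGetD X i []) j "" ++ " " ++
                              PySem.List.pyGetD (PySem.List.pyGetD X i []) (j + 1) ""]) []]) []
    = X.map pvBigrams := by
  have h1 : ∀ i : Int,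
      (PySem.List.pyRange 0 (PySem.List.len (PySem.List.pyGetD X i []) - 1) 1).foldl
        (fun row j => row ++ [PySem.List.pyGetD (PySem.List.pyGetD X i []) j "" ++ " " ++
                              PySem.List.pyGetD (PySem.List.pyGetD X i []) (j + 1) ""]) []
      = pvBigrams (PySem.List.pyGetD X i []) := fun i => pvRow_eq_bigrams _
  calc (PySem.List.pyRange 0 (PySem.List.len X) 1).foldl (fun newX i =>
      newX ++ [(PySem.List.pyRange 0 (PySem.List.len (PySem.List.pyGetD X i []) - 1) 1).foldl
        (fun row j => row ++ [PySem.List.pyGetD (PySem.List.pyGetD X i []) j "" ++ " " ++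
                              PySem.List.pyGetD (PySem.List.pyGetD X i []) (j + 1) ""]) []]) []
      = (PySem.List.pyRange 0 (PySem.List.len X) 1).foldl
          (fun newX i => newX ++ [pvBigrams (PySem.List.pyGetD X i [])]) [] := by
        congr 1; funext newX i; rw [h1]
    _ = (PySem.List.pyRange 0 (PySem.List.len X) 1).map
          (fun i => pvBigrams (PySem.List.pyGetD X i [])) := by
        simpa using PySem.List.foldl_append_singleton_eq_map _ _ []
    _ = ((PySem.List.pyRange 0 (PySem.List.len X) 1).map
          (fun i => PySem.List.pyGetD X i [])).map pvBigrams := by rw [List.map_map]; rfl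
    _ = X.map pvBigrams := by rw [PySem.List.map_pyGetD_pyRange_zero]

lemma bigrams_nil : pvBigrams ([] : List String) = [] := rfl

-- indexing the mapped corpus
lemma pyGetD_map_bigrams (X : List (List String)) (i : Int) :
    PySem.List.pyGetD (X.map pvBigrams) i [] = pvBigrams (PySem.List.pyGetD X i []) := by
  rw [← bigrams_nil, PySem.List.pyGetD_map, bigrams_nil]

-- count_words over the corpus = B's unigram fold shape
lemma countWords_eq_fold (X : List (List String)) (y : List Int) (flag : Int) :
    pvCountWords X y flag
    = (PySem.List.pyRange 0 (PySem.List.len y) 1).foldl (fun m idx =>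
        if PySem.List.pyGetD y idx 0 == flag then pvAdd m (PySem.List.pyGetD X idx []) else m)
        PySem.Dict.empty := by
  unfold pvCountWords
  congr 1
  funext m idx
  rw [pvAddA_eq_pvAdd]

theorem create_word_maps_bi_eq (X : List (List String)) (y : List Int) (max_size : Option Int) :
    create_word_maps_bi X y max_size = create_word_maps_bi_alt X y max_size := by
  unfold create_word_maps_bi create_word_maps_bi_alt
  simp only [newX_eq_map, countWords_eq_fold]
  set G := fun (s : PySem.Dict String Int × PySem.Dict String Int × PySem.Dict String Int × PySem.Dict String Int) (idx : Int) =>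
    let label := PySem.List.pyGetD y idx 0
    if label == 1 then
      let doc := PySem.List.pyGetD X idx []
      (pvAdd s.1 doc, pvAdd s.2.1 (pvBigrams doc), s.2.2.1, s.2.2.2)
    else if label == 0 then
      let doc := PySem.List.pyGetD X idx []
      (s.1, s.2.1, pvAdd s.2.2.1 doc, pvAdd s.2.2.2 (pvBigrams doc))
    else s with hG
  have hc1 : ∀ s i, (G s i).1 =
      (if PySem.List.pyGetD y i 0 == 1 then pvAdd s.1 (PySem.List.pyGetD X i []) else s.1) := by
    intro s i
    rw [hG]; simp only
    by_cases h1 : PySem.List.pyGetD y i 0 = 1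
    · simp [h1]
    · by_cases h0 : PySem.List.pyGetD y i 0 = 0 <;> simp [h1, h0]
  have hc2 : ∀ s i, (G s i).2.1 =
      (if PySem.List.pyGetD y i 0 == 1 then pvAdd s.2.1 (pvBigrams (PySem.List.pyGetD X i [])) else s.2.1) := by
    intro s i
    rw [hG]; simp only
    by_cases h1 : PySem.List.pyGetD y i 0 = 1
    · simp [h1]
    · by_cases h0 : PySem.List.pyGetD y i 0 = 0 <;> simp [h1, h0]
  have hc3 : ∀ s i, (G s i).2.2.1 =
      (if PySem.List.pyGetD y i 0 == 0 then pvAdd s.2.2.1 (PySem.List.pyGetD X i []) else s.2.2.1) := by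
    intro s i
    rw [hG]; simp only
    by_cases h1 : PySem.List.pyGetD y i 0 = 1
    · simp [h1]
    · by_cases h0 : PySem.List.pyGetD y i 0 = 0 <;> simp [h1, h0]
  have hc4 : ∀ s i, (G s i).2.2.2 =
      (if PySem.List.pyGetD y i 0 == 0 then pvAdd s.2.2.2 (pvBigrams (PySem.List.pyGetD X i [])) else s.2.2.2) := by
    intro s i
    rw [hG]; simp only
    by_cases h1 : PySem.List.pyGetD y i 0 = 1
    · simp [h1]
    · by_cases h0 : PySem.List.pyGetD y i 0 = 0 <;> simp [h1, h0]
  have hpu := foldl_proj G (fun m idx => if PySem.List.pyGetD y idx 0 == 1 then pvAdd m (PySem.List.pyGetD X idx []) else m) (fun s => s.1) hc1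
    (PySem.List.pyRange 0 (PySem.List.len y) 1)
    (PySem.Dict.empty, PySem.Dict.empty, PySem.Dict.empty, PySem.Dict.empty)
  have hpb := foldl_proj G (fun m idx => if PySem.List.pyGetD y idx 0 == 1 then pvAdd m (pvBigrams (PySem.List.pyGetD X idx [])) else m) (fun s => s.2.1) hc2
    (PySem.List.pyRange 0 (PySem.List.len y) 1)
    (PySem.Dict.empty, PySem.Dict.empty, PySem.Dict.empty, PySem.Dict.empty)
  have hnu := foldl_proj G (fun m idx => if PySem.List.pyGetD y idx 0 == 0 then pvAdd m (PySem.List.pyGetD X idx []) else m) (fun s => s.2.2.1) hc3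
    (PySem.List.pyRange 0 (PySem.List.len y) 1)
    (PySem.Dict.empty, PySem.Dict.empty, PySem.Dict.empty, PySem.Dict.empty)
  have hnb := foldl_proj G (fun m idx => if PySem.List.pyGetD y idx 0 == 0 then pvAdd m (pvBigrams (PySem.List.pyGetD X idx [])) else m) (fun s => s.2.2.2) hc4
    (PySem.List.pyRange 0 (PySem.List.len y) 1)
    (PySem.Dict.empty, PySem.Dict.empty, PySem.Dict.empty, PySem.Dict.empty)
  have hb : ∀ flag : Int,
      ((PySem.List.pyRange 0 (PySem.List.len y) 1).foldl (fun m idx =>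
        if PySem.List.pyGetD y idx 0 == flag then pvAdd m (PySem.List.pyGetD (X.map pvBigrams) idx []) else m)
        PySem.Dict.empty)
      = ((PySem.List.pyRange 0 (PySem.List.len y) 1).foldl (fun m idx =>
        if PySem.List.pyGetD y idx 0 == flag then pvAdd m (pvBigrams (PySem.List.pyGetD X idx [])) else m)
        PySem.Dict.empty) := by
    intro flag; congr 1; funext m idx; rw [pyGetD_map_bigrams]
  rw [hb 1, hb 0, hpu, hpb, hnu, hnb]

-- ===== VERDICT (by name: the statement is the Claim_ definition above) =====
theorem create_word_maps_bi_spec : Claim_equal_create_word_maps_bi := by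
  intro X y max_size _ _
  unfold Spec_create_word_maps_bi
  exact create_word_maps_bi_eq X y max_size
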